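-- pv_equiv track=rewrite | github.com/ZeroIntensity/pyawaitable | hatch_build.py | orderize_mangled
-- ===== SOURCE A (Python) =====
-- MANGLED = "__PyAwaitable_Mangled_"
--
-- def orderize_mangled(changed_names: dict[str, str]) -> dict[str, str]:
--     result: dict[str, str] = {}
--     orders: list[tuple[str, int]] = []
--
--     for name in changed_names.keys():
--         # Count how many times other keys go into name
--         amount = 0
--         for second_name in changed_names.keys():
--             if second_name in name:
--                 amount += 1
--
--         orders.append((name, amount))
--
--     orders.sort(key=lambda item: item[1])
--     for index, data in enumerate(orders.copy()):
--         name, amount = data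
--         if changed_names[name].startswith(MANGLED):
--             # Always do explicit mangles last
--             orders.insert(0, orders.pop(index))
--
--     for name, amount in reversed(orders):
--         result[name] = changed_names[name]
--
--     return result
-- ===== SOURCE B (Python) =====
-- MANGLED = "__PyAwaitable_Mangled_"
--
-- def orderize_mangled(changed_names: dict[str, str]) -> dict[str, str]:
--     keys = list(changed_names)
--     ordered = sorted(keys, key=lambda name: sum(k in name for k in keys))
--     plain = [k for k in ordered if not changed_names[k].startswith(MANGLED)]
--     mangled = [k for k in ordered if changed_names[k].startswith(MANGLED)]
--     return {k: changed_names[k] for k in plain[::-1] + mangled}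
-- ===== Notes on version B (the rewrite author's own statement) =====
-- stated objective: simpler
-- what changed: B sorts the keys directly by their substring count and builds the result by a stable partition into plain/mangled keys (reversed plain first, then mangled), replacing A's sort of (name,count) pairs, its mutating enumerate/pop/insert pass over the live list, and the final reversed dict rebuild.
import Mathlib
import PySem

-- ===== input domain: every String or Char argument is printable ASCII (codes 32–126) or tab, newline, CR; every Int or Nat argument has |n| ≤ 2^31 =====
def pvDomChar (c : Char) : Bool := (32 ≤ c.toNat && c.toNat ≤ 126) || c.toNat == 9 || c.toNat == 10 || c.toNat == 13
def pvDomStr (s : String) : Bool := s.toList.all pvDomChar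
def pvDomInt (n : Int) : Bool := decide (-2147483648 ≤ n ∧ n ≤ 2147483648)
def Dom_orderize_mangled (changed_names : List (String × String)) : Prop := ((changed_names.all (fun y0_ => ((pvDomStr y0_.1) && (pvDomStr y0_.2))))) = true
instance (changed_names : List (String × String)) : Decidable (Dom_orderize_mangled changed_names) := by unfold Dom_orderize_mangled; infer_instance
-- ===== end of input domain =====

-- B replaces A's sort of (name, count) pairs followed by the mutating pop/insert pass and the
-- final reversed dict rebuild with a direct stable sort of the keys and a partition into
-- plain/mangled keys (objective: simpler; same asymptotic cost).
-- The dict parameter is modelled as an association list canonicalised by PySem.Dict.ofList.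

-- ===== PORT A =====
def pvMANGLED : String := "__PyAwaitable_Mangled_"

-- 'changed_names[name].startswith(MANGLED)' (used by both Pythons verbatim)
def pvMang (d : PySem.Dict String String) (name : String) : Bool :=
  PySem.Str.startswith (d.getD name "") pvMANGLED

-- one iteration of A's 'for index, data in enumerate(orders.copy())' loop body,
-- acting on the live list o (pop never raises here: index < len(orders) throughout)
def pvShuffleStep (d : PySem.Dict String String) (o : List (String × Int)) (ix : Int × (String × Int)) : List (String × Int) :=
  if pvMang d ix.2.1 then
    match PySem.List.pop? o ix.1 with
    | some r => PySem.List.insert r.2 0 r.1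
    | none => o
  else o

def orderize_mangled (changed_names : List (String × String)) : List (String × String) :=
  let d := PySem.Dict.ofList changed_names
  let orders := d.keys.foldl (fun acc name =>
      acc ++ [(name, d.keys.foldl (fun amount second_name =>
        if PySem.Str.isIn second_name name then amount + 1 else amount) (0 : Int))]) []
  let orders1 := PySem.List.sorted orders (fun item => item.2) false
  let orders2 := (PySem.List.enumerate orders1).foldl (pvShuffleStep d) orders1
  (orders2.reverse.foldl (fun result p => result.insert p.1 (d.getD p.1 "")) PySem.Dict.empty).items

-- ===== PORT B =====
def orderize_mangled_alt (changed_names : List (String × String)) : List (String × String) :=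
  let d := PySem.Dict.ofList changed_names
  let keys := d.keys
  let ordered := PySem.List.sorted keys
    (fun name => (keys.map (fun k => if PySem.Str.isIn k name then (1 : Int) else 0)).sum) false
  let plain := ordered.filter (fun k => !(pvMang d k))
  let mangled := ordered.filter (fun k => pvMang d k)
  -- dict comprehension over DISTINCT keys: its items are exactly this map, in list order
  (plain.reverse ++ mangled).map (fun k => (k, d.getD k ""))

-- ===== PRECONDITION & SPEC =====
def Spec_orderize_mangled (changed_names : List (String × String)) (out : List (String × String)) : Prop := out = orderize_mangled_alt changed_names
instance (changed_names : List (String × String)) (out : List (String × String)) : Decidable (Spec_orderize_mangled changed_names out) := by unfold Spec_orderize_mangled; infer_instance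

-- ===== CLAIM (what is proved, stated in full; the proofs are below) =====
def Claim_equal_orderize_mangled : Prop := ∀ (changed_names : List (String × String)), Dom_orderize_mangled changed_names → Spec_orderize_mangled changed_names (orderize_mangled changed_names)

-- ===== LEMMAS AND PROOFS =====

-- insertion sort commutes with map when the key factors through the map
theorem pv_insertBy_map {α β κ : Type} [LinearOrder κ] (f : α → β) (key : β → κ) (x : α) (ys : List α) :
    PySem.List.insertBy (fun a b => decide (key a < key b)) (f x) (ys.map f)
      = (PySem.List.insertBy (fun a b => decide (key (f a) < key (f b))) x ys).map f := by
  induction ys with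
  | nil => simp [PySem.List.insertBy]
  | cons y t ih =>
      simp only [List.map_cons, PySem.List.insertBy]
      by_cases h : key (f x) < key (f y) <;> simp [h, ih]

theorem pv_sorted_map {α β κ : Type} [LinearOrder κ] (f : α → β) (key : β → κ) (xs : List α) :
    PySem.List.sorted (xs.map f) key false
      = (PySem.List.sorted xs (fun a => key (f a)) false).map f := by
  rw [PySem.List.sorted_eq_foldl_insertBy, PySem.List.sorted_eq_foldl_insertBy, List.foldl_map]
  suffices h : ∀ (acc : List α),
      xs.foldl (fun acc x => PySem.List.insertBy (fun a b => decide (key a < key b)) (f x) acc) (acc.map f)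
        = (xs.foldl (fun acc x => PySem.List.insertBy (fun a b => decide (key (f a) < key (f b))) x acc) acc).map f by
    simpa using h []
  induction xs with
  | nil => intro acc; simp
  | cons x t ih => intro acc; simp only [List.foldl_cons, pv_insertBy_map, ih]

-- the pop/insert pass: invariant. State = macc ++ uacc ++ rest, index = |macc| + |uacc|.
theorem pv_shuffle_inv (d : PySem.Dict String String) (rest macc uacc : List (String × Int)) :
    (PySem.List.enumerate rest ((macc.length + uacc.length : Nat) : Int)).foldl (pvShuffleStep d)
        (macc ++ uacc ++ rest)
      = (rest.filter (fun e => pvMang d e.1)).reverse ++ macc ++ uacc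
          ++ rest.filter (fun e => !(pvMang d e.1)) := by
  induction rest generalizing macc uacc with
  | nil => simp [PySem.List.enumerate_nil]
  | cons x t ih =>
      rw [PySem.List.enumerate_cons, List.foldl_cons]
      have hlen : macc.length + uacc.length < (macc ++ uacc ++ (x :: t)).length := by
        rw [List.length_append, List.length_append, List.length_cons]; omega
      have hget : (macc ++ uacc ++ (x :: t))[macc.length + uacc.length]'hlen = x := by
        rw [List.getElem_append_right (by simp)]
        simp
      have herase : (macc ++ uacc ++ (x :: t)).eraseIdx (macc.length + uacc.length) = macc ++ uacc ++ t := by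
        rw [List.eraseIdx_append_of_length_le (by simp)]
        simp
      have hpop : PySem.List.pop? (macc ++ uacc ++ (x :: t)) ((macc.length + uacc.length : Nat) : Int)
          = some (x, macc ++ uacc ++ t) := by
        rw [PySem.List.pop?_natCast _ _ hlen, hget, herase]
      by_cases hm : pvMang d x.1
      · have hstep : pvShuffleStep d (macc ++ uacc ++ (x :: t)) ((((macc.length + uacc.length : Nat)) : Int), x)
            = (x :: macc) ++ uacc ++ t := by
          unfold pvShuffleStep
          rw [if_pos hm, hpop]
          simp [PySem.List.insert_zero]
        rw [hstep]
        have hrec := ih (macc := x :: macc) (uacc := uacc)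
        have hidx : (((x :: macc).length + uacc.length : Nat) : Int)
            = ((macc.length + uacc.length : Nat) : Int) + 1 := by push_cast [List.length_cons, List.length_append, List.length_nil]; omega
        rw [hidx] at hrec
        rw [hrec]
        simp [hm]
      · have hstep : pvShuffleStep d (macc ++ uacc ++ (x :: t)) ((((macc.length + uacc.length : Nat)) : Int), x)
            = macc ++ (uacc ++ [x]) ++ t := by
          unfold pvShuffleStep
          rw [if_neg (by simp [hm])]
          simp
        rw [hstep]
        have hrec := ih (macc := macc) (uacc := uacc ++ [x])
        have hidx : ((macc.length + (uacc ++ [x]).length : Nat) : Int)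
            = ((macc.length + uacc.length : Nat) : Int) + 1 := by push_cast [List.length_cons, List.length_append, List.length_nil]; omega
        rw [hidx] at hrec
        rw [hrec]
        simp [hm]

theorem pv_shuffle (d : PySem.Dict String String) (s : List (String × Int)) :
    (PySem.List.enumerate s).foldl (pvShuffleStep d) s
      = (s.filter (fun e => pvMang d e.1)).reverse ++ s.filter (fun e => !(pvMang d e.1)) := by
  have h := pv_shuffle_inv d s [] []
  simpa using h

-- the final dict-building loop over a pair list with distinct keys
theorem pv_build (d : PySem.Dict String String) (l : List (String × Int))
    (h : (l.map Prod.fst).Nodup) :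
    (l.foldl (fun result p => result.insert p.1 (d.getD p.1 "")) PySem.Dict.empty).items
      = l.map (fun p => (p.1, d.getD p.1 "")) := by
  have hb := PySem.Dict.items_foldl_insert_fresh l (fun p => p.1) (fun p => d.getD p.1 "")
      PySem.Dict.empty (by intro a _; simp) h
  simpa using hb


-- assembling the final association list: filters/maps commute, then the dict build
theorem pv_assemble (d : PySem.Dict String String) (cnt : String → Int) (S : List String)
    (hperm : S.Perm d.keys) (hnd : d.keys.Nodup) :
    (List.foldl (fun result p => result.insert p.1 (d.getD p.1 "")) PySem.Dict.empty
        ((List.filter (fun e => pvMang d e.1) (S.map (fun x => (x, cnt x)))).reverse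
          ++ List.filter (fun e => !pvMang d e.1) (S.map (fun x => (x, cnt x)))).reverse).items
      = List.map (fun k => (k, d.getD k ""))
          ((List.filter (fun k => !pvMang d k) S).reverse ++ List.filter (fun k => pvMang d k) S) := by
  have h1 : List.filter (fun e => pvMang d e.1) (S.map (fun x => (x, cnt x)))
      = (List.filter (fun k => pvMang d k) S).map (fun x => (x, cnt x)) := by
    rw [List.filter_map]; rfl
  have h2 : List.filter (fun e => !pvMang d e.1) (S.map (fun x => (x, cnt x)))
      = (List.filter (fun k => !pvMang d k) S).map (fun x => (x, cnt x)) := by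
    rw [List.filter_map]; rfl
  have h3 : (((List.filter (fun k => pvMang d k) S).map (fun x => (x, cnt x))).reverse
      ++ (List.filter (fun k => !pvMang d k) S).map (fun x => (x, cnt x))).reverse
      = ((List.filter (fun k => !pvMang d k) S).reverse
          ++ List.filter (fun k => pvMang d k) S).map (fun x => (x, cnt x)) := by
    simp
  rw [h1, h2, h3]
  set W := (List.filter (fun k => !pvMang d k) S).reverse ++ List.filter (fun k => pvMang d k) S with hW
  have hWperm : W.Perm S := by
    have hrev : ((List.filter (fun k => !pvMang d k) S).reverse).Perm
        (List.filter (fun k => !pvMang d k) S) := List.reverse_perm _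
    have h4 := List.filter_append_perm (fun k => !pvMang d k) S
    have h5 : (List.filter (fun k => pvMang d k) S)
        = List.filter (fun x => !(!pvMang d x)) S := by simp
    have h6 : ((List.filter (fun k => !pvMang d k) S)
        ++ List.filter (fun k => pvMang d k) S).Perm S := by
      rw [h5]; exact h4
    exact (hrev.append_right _).trans h6
  have hWnd : W.Nodup := ((hWperm.trans hperm).symm.nodup) hnd
  have hfst : (W.map (fun x => (x, cnt x))).map Prod.fst = W := by
    rw [List.map_map]
    show List.map id W = W
    exact List.map_id W
  rw [pv_build d (W.map (fun x => (x, cnt x))) (by rw [hfst]; exact hWnd)]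
  rw [List.map_map]
  rfl

theorem orderize_mangled_eq (cn : List (String × String)) :
    orderize_mangled cn = orderize_mangled_alt cn := by
  unfold orderize_mangled orderize_mangled_alt
  have hnd : (PySem.Dict.ofList cn).keys.Nodup := PySem.Dict.nodup_keys_ofList cn
  simp only [PySem.List.foldl_append_singleton_eq_map, PySem.List.foldl_if_add_one,
    PySem.List.sum_map_ite_one_zero, zero_add, List.nil_append]
  rw [pv_sorted_map]
  rw [pv_shuffle]
  exact pv_assemble (PySem.Dict.ofList cn) _ _ (PySem.List.sorted_perm _ _ _) hnd

-- ===== VERDICT (by name: the statement is the Claim_ definition above) =====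
theorem orderize_mangled_spec : Claim_equal_orderize_mangled := by
  intro changed_names _
  unfold Spec_orderize_mangled
  exact orderize_mangled_eq changed_names
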